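-- pv_equiv track=rewrite | github.com/daleharris541/jimmy | managers/ConstructionManager.py | get_build_order_progress
-- ===== SOURCE A (Python) =====
-- def get_build_order_progress(build_order, buildstep):
--     expected_structures = {}
--     for i in range(buildstep):
--         if build_order[i][2] == 'structure':
--             if build_order[i][0] in expected_structures:
--                 expected_structures[build_order[i][0]] += 1
--             else:
--                 expected_structures[build_order[i][0]] = 1
--     sorted_expected_structures = sorted(expected_structures.items())
--
--     return dict(sorted_expected_structures)
-- ===== SOURCE B (Python) =====
-- def get_build_order_progress(build_order, buildstep):
--     names = []
--     for i in range(buildstep):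
--         entry = build_order[i]
--         if entry[2] == 'structure':
--             names.append(entry[0])
--     names.sort()
--     result = {}
--     i = 0
--     while i < len(names):
--         j = i + 1
--         while j < len(names) and names[j] == names[i]:
--             j += 1
--         result[names[i]] = j - i
--         i = j
--     return result
-- ===== Notes on version B (the rewrite author's own statement) =====
-- stated objective: alternative
-- what changed: Replaces the incremental dict-counting pass followed by sorting the items with a sort-then-scan strategy: collect the structure names from the prefix, sort the name list, and emit (name, run length) pairs by a single run-length scan over the sorted list.
import Mathlib
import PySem

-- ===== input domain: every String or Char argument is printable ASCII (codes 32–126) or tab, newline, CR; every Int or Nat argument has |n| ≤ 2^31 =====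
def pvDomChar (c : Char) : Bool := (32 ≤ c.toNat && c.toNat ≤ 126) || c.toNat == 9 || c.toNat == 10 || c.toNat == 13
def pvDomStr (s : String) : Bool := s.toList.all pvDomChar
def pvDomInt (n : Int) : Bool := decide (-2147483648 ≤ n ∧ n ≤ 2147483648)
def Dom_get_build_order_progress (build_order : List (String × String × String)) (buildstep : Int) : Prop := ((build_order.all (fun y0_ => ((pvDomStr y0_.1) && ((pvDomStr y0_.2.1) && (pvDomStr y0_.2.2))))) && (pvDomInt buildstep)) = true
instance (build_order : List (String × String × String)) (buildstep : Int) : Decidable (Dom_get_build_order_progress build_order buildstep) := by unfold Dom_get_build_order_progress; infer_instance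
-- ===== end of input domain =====

-- B replaces A's incremental dict counting + items sort by collect-names / sort / run-length scan; return-value equivalence only (B sorts its own temporary list, not an argument).

-- ===== PORT A =====
-- dict of counts built incrementally over the prefix, then sorted(items) (Python tuple order = sorted2 fst snd)
def get_build_order_progress (build_order : List (String × String × String)) (buildstep : Int) : List (String × Int) :=
  PySem.List.sorted2 ((PySem.List.pyRange 0 buildstep 1).foldl (fun d i =>
    match PySem.List.pyGet? build_order i with
    | none => d          -- build_order[i] raises IndexError here; excluded by Pre_
    | some t =>
      if t.2.2 == "structure" then
        match d.get? t.1 with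
        | some c => d.insert t.1 (c + 1)
        | none => d.insert t.1 1
      else d) PySem.Dict.empty).items Prod.fst Prod.snd false

-- ===== PORT B =====
-- the run-length scan of Source B (the while loops over the sorted list), as structural recursion
def pvRunLengths (names : List String) : List (String × Int) :=
  match names with
  | [] => []
  | x :: rest =>
    (x, ((rest.takeWhile (fun y => y == x)).length : Int) + 1) ::
      pvRunLengths (rest.dropWhile (fun y => y == x))
termination_by names.length
decreasing_by
  have h := (List.dropWhile_sublist (p := fun y => y == x) (l := rest)).length_le
  simp only [List.length_cons]
  omega

def get_build_order_progress_alt (build_order : List (String × String × String)) (buildstep : Int) : List (String × Int) :=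
  pvRunLengths (PySem.List.sorted ((PySem.List.pyRange 0 buildstep 1).foldl (fun acc i =>
    match PySem.List.pyGet? build_order i with
    | none => acc        -- build_order[i] raises IndexError here; excluded by Pre_
    | some entry => if entry.2.2 == "structure" then acc ++ [entry.1] else acc) []) (fun x => x) false)

-- ===== PRECONDITION & SPEC =====
-- Pre_ excludes exactly the inputs where Python A raises IndexError: buildstep larger than len(build_order).
def Pre_get_build_order_progress (build_order : List (String × String × String)) (buildstep : Int) : Prop :=
  buildstep ≤ (build_order.length : Int)
instance (build_order : List (String × String × String)) (buildstep : Int) : Decidable (Pre_get_build_order_progress build_order buildstep) := by unfold Pre_get_build_order_progress; infer_instance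
def pvWitness_get_build_order_progress : (List (String × String × String)) × Int :=
  ([("pylon", "a", "structure"), ("probe", "b", "unit"), ("pylon", "c", "structure")], 3)

def Spec_get_build_order_progress (build_order : List (String × String × String)) (buildstep : Int) (out : List (String × Int)) : Prop := out = get_build_order_progress_alt build_order buildstep
instance (build_order : List (String × String × String)) (buildstep : Int) (out : List (String × Int)) : Decidable (Spec_get_build_order_progress build_order buildstep out) := by unfold Spec_get_build_order_progress; infer_instance

-- ===== CLAIM (what is proved, stated in full; the proofs are below) =====
def Claim_equal_get_build_order_progress : Prop := ∀ (build_order : List (String × String × String)) (buildstep : Int), Dom_get_build_order_progress build_order buildstep → Pre_get_build_order_progress build_order buildstep → Spec_get_build_order_progress build_order buildstep (get_build_order_progress build_order buildstep)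

-- ===== LEMMAS AND PROOFS =====

-- the shared loop "for i in range(buildstep): … build_order[i] …" is a fold over the prefix list
theorem pvFoldPrefixNat {σ : Type} (bo : List (String × String × String)) (f : σ → (String × String × String) → σ) :
    ∀ (n : Nat), n ≤ bo.length → ∀ (init : σ),
      (PySem.List.pyRange 0 (n : Int) 1).foldl
        (fun s i => match PySem.List.pyGet? bo i with | none => s | some t => f s t) init
      = (bo.take n).foldl f init := by
  intro n
  induction n with
  | zero => intro _ init; simp [PySem.List.pyRange_one_eq_nil]
  | succ m ih =>
    intro h init
    have hm : m ≤ bo.length := Nat.le_of_succ_le h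
    have hcast : ((m + 1 : Nat) : Int) = (m : Int) + 1 := by push_cast; ring
    rw [hcast, PySem.List.pyRange_one_succ_right (by positivity), List.foldl_append]
    have hget : PySem.List.pyGet? bo (m : Int) = some bo[m] :=
      PySem.List.pyGet?_ofNat (h := h)
    rw [ih hm]
    have hm' : bo[m]? = some bo[m] := List.getElem?_eq_getElem h
    simp only [List.foldl_cons, List.foldl_nil, hget]
    rw [List.take_add_one, hm', Option.toList_some, List.foldl_append, List.foldl_cons, List.foldl_nil]

theorem pvFoldPrefix {σ : Type} (bo : List (String × String × String)) (f : σ → (String × String × String) → σ)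
    (b : Int) (hb : b ≤ (bo.length : Int)) (init : σ) :
      (PySem.List.pyRange 0 b 1).foldl
        (fun s i => match PySem.List.pyGet? bo i with | none => s | some t => f s t) init
      = (bo.take b.toNat).foldl f init := by
  by_cases h0 : b ≤ 0
  · have : b.toNat = 0 := Int.toNat_of_nonpos h0
    rw [PySem.List.pyRange_one_eq_nil h0, this]
    simp
  · have hb' : b = (b.toNat : Int) := (Int.toNat_of_nonneg (by omega)).symm
    rw [hb']
    exact pvFoldPrefixNat bo f b.toNat (by omega) init

-- A's dict loop over the prefix is Counter of the filtered names
theorem pvDictLoopEqCounterAux (l : List (String × String × String)) :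
    ∀ (d : PySem.Dict String Int),
      l.foldl (fun d t =>
        if t.2.2 == "structure" then
          match d.get? t.1 with
          | some c => d.insert t.1 (c + 1)
          | none => d.insert t.1 1
        else d) d
      = ((l.filter (fun t => t.2.2 == "structure")).map (fun t => t.1)).foldl
          (fun d k => d.insert k (d.getD k 0 + 1)) d := by
  induction l with
  | nil => intro d; rfl
  | cons t rest ih =>
    intro d
    by_cases hp : (t.2.2 == "structure") = true
    · rw [List.foldl_cons, if_pos hp, List.filter_cons, if_pos hp, List.map_cons, List.foldl_cons]
      cases hg : d.get? t.1 with
      | none => rw [ih]; simp [PySem.Dict.getD, hg]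
      | some c => rw [ih]; simp [PySem.Dict.getD, hg]
    · rw [List.foldl_cons, if_neg hp, List.filter_cons, if_neg hp]
      exact ih d

theorem pvDictLoopEqCounter (l : List (String × String × String)) :
    l.foldl (fun d t =>
        if t.2.2 == "structure" then
          match d.get? t.1 with
          | some c => d.insert t.1 (c + 1)
          | none => d.insert t.1 1
        else d) (PySem.Dict.empty : PySem.Dict String Int)
    = PySem.Dict.counter ((l.filter (fun t => t.2.2 == "structure")).map (fun t => t.1)) := by
  rw [pvDictLoopEqCounterAux, PySem.Dict.foldl_insert_getD_add_one_eq_counter]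

-- insertBy / sorted2 vs sorted with key fst when the comparison functions agree on the elements
theorem pvInsertByCongr {α : Type} (b1 b2 : α → α → Bool) (x : α) :
    ∀ (ys : List α), (∀ y ∈ ys, b1 x y = b2 x y) →
      PySem.List.insertBy b1 x ys = PySem.List.insertBy b2 x ys := by
  intro ys
  induction ys with
  | nil => intro _; rfl
  | cons y ys ih =>
    intro h
    simp only [PySem.List.insertBy]
    rw [h y (by simp)]
    split
    · rfl
    · rw [ih (fun z hz => h z (List.mem_cons_of_mem _ hz))]

theorem pvFoldlInsertByCongr {α : Type} (b1 b2 : α → α → Bool) :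
    ∀ (l acc : List α), (∀ a ∈ l, ∀ y ∈ acc, b1 a y = b2 a y) → (∀ a ∈ l, ∀ b ∈ l, b1 a b = b2 a b) →
      l.foldl (fun acc x => PySem.List.insertBy b1 x acc) acc
      = l.foldl (fun acc x => PySem.List.insertBy b2 x acc) acc := by
  intro l
  induction l with
  | nil => intro acc _ _; rfl
  | cons x xs ih =>
    intro acc hacc hl
    simp only [List.foldl_cons]
    rw [pvInsertByCongr b1 b2 x acc (hacc x (by simp))]
    apply ih
    · intro a ha y hy
      rcases (PySem.List.mem_insertBy b2 x y acc).mp hy with rfl | hy'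
      · exact hl a (List.mem_cons_of_mem _ ha) y (by simp)
      · exact hacc a (List.mem_cons_of_mem _ ha) y hy'
    · intro a ha b hb
      exact hl a (List.mem_cons_of_mem _ ha) b (List.mem_cons_of_mem _ hb)

theorem pvSorted2EqSortedFst (l : List (String × Int))
    (hinj : ∀ a ∈ l, ∀ b ∈ l, a.1 = b.1 → a = b) :
    PySem.List.sorted2 l Prod.fst Prod.snd false = PySem.List.sorted l Prod.fst false := by
  show l.foldl (fun acc x => PySem.List.insertBy _ x acc) [] = l.foldl (fun acc x => PySem.List.insertBy _ x acc) []
  apply pvFoldlInsertByCongr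
  · intro a _ y hy; cases hy
  · intro a ha b hb
    by_cases hab : a.1 < b.1
    · simp [hab]
    · by_cases hba : b.1 < a.1
      · simp [hab, hba]
      · have heq : a.1 = b.1 := le_antisymm (not_lt.mp hba) (not_lt.mp hab)
        have : a = b := hinj a ha b hb heq
        subst this
        simp

-- run-length scan facts on a weakly sorted list
theorem pvLtOfMemDropWhile (x : String) :
    ∀ (rest : List String), (x :: rest).Pairwise (· ≤ ·) →
      ∀ y ∈ rest.dropWhile (fun z => z == x), x < y := by
  intro rest
  induction rest with
  | nil => intro _ y hy; simp [List.dropWhile] at hy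
  | cons r rs ih =>
    intro hp y hy
    rw [List.dropWhile_cons] at hy
    by_cases hr : r == x
    · rw [if_pos hr] at hy
      have hrx : r = x := by simpa using hr
      apply ih _ y hy
      rcases List.pairwise_cons.mp hp with ⟨hx, hrp⟩
      rcases List.pairwise_cons.mp hrp with ⟨_, hrs⟩
      exact List.pairwise_cons.mpr ⟨fun z hz => hx z (List.mem_cons_of_mem _ hz), hrs⟩
    · rw [if_neg hr] at hy
      rcases List.pairwise_cons.mp hp with ⟨hx, hrp⟩
      have hxr : x < r := lt_of_le_of_ne (hx r (by simp)) (fun hxe => hr (by simp [hxe.symm]))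
      cases hy with
      | head => exact hxr
      | tail _ hy' =>
        rcases List.pairwise_cons.mp hrp with ⟨hr2, _⟩
        exact lt_of_lt_of_le hxr (hr2 y hy')

theorem pvMemFstRuns : ∀ (l : List String) (k : String),
    k ∈ (pvRunLengths l).map Prod.fst ↔ k ∈ l := by
  intro l
  induction l using pvRunLengths.induct with
  | case1 => intro k; simp [pvRunLengths]
  | case2 x rest ih =>
    intro k
    rw [pvRunLengths]
    simp only [List.map_cons, List.mem_cons, ih]
    constructor
    · rintro (rfl | hk)
      · exact (by simp)
      · exact Or.inr (((List.dropWhile_sublist _).mem) hk)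
    · rintro (rfl | hk)
      · exact Or.inl rfl
      · rw [← List.takeWhile_append_dropWhile (p := fun z => z == x) (l := rest)] at hk
        rcases List.mem_append.mp hk with hk1 | hk2
        · exact Or.inl (by simpa using List.mem_takeWhile_imp hk1)
        · exact Or.inr hk2

theorem pvRunsSnd : ∀ (l : List String), l.Pairwise (· ≤ ·) →
    ∀ p ∈ pvRunLengths l, p.2 = (l.count p.1 : Int) := by
  intro l
  induction l using pvRunLengths.induct with
  | case1 => intro _ p hp; simp [pvRunLengths] at hp
  | case2 x rest ih =>
    intro hp p hmem
    have hd : (rest.dropWhile (fun z => z == x)).Pairwise (· ≤ ·) :=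
      hp.sublist ((List.dropWhile_sublist _).trans (List.sublist_cons_self x rest))
    rw [pvRunLengths] at hmem
    have hxd : ∀ y ∈ rest.dropWhile (fun z => z == x), x < y := pvLtOfMemDropWhile x rest hp
    rcases List.mem_cons.mp hmem with rfl | hmem'
    · -- head run: count x (x :: rest) = 1 + |takeWhile|
      have hsplit := List.takeWhile_append_dropWhile (p := fun z => z == x) (l := rest)
      have hct : (rest.takeWhile (fun z => z == x)).count x = (rest.takeWhile (fun z => z == x)).length := by
        apply List.count_eq_length.mpr
        intro y hy
        have h2 : y = x := by simpa using List.mem_takeWhile_imp hy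
        simp [h2]
      have hcd : (rest.dropWhile (fun z => z == x)).count x = 0 := by
        apply List.count_eq_zero.mpr
        intro hx
        exact absurd (hxd x hx) (lt_irrefl x)
      have hcr : rest.count x = (rest.takeWhile (fun z => z == x)).length := by
        conv_lhs => rw [← hsplit]
        rw [List.count_append, hct, hcd]
        omega
      show ((rest.takeWhile (fun y => y == x)).length : Int) + 1 = ((x :: rest).count x : Int)
      rw [List.count_cons_self, hcr]
      push_cast
      ring
    · -- recursive runs: keys there are > x, so counting in the tail suffices
      have hrec := ih hd p hmem'
      have hkd : p.1 ∈ rest.dropWhile (fun z => z == x) := by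
        have : p.1 ∈ (pvRunLengths (rest.dropWhile (fun z => z == x))).map Prod.fst :=
          List.mem_map.mpr ⟨p, hmem', rfl⟩
        exact (pvMemFstRuns _ p.1).mp this
      have hxk : x < p.1 := hxd p.1 hkd
      have hsplit := List.takeWhile_append_dropWhile (p := fun z => z == x) (l := rest)
      have hct : (rest.takeWhile (fun z => z == x)).count p.1 = 0 := by
        apply List.count_eq_zero.mpr
        intro hmem''
        have : p.1 = x := by simpa using List.mem_takeWhile_imp hmem''
        exact absurd this (ne_of_gt hxk)
      have hcr : rest.count p.1 = (rest.dropWhile (fun z => z == x)).count p.1 := by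
        conv_lhs => rw [← hsplit]
        rw [List.count_append, hct, Nat.zero_add]
      have hcc : (x :: rest).count p.1 = rest.count p.1 := List.count_cons_of_ne hxk.ne
      rw [hrec, hcc, hcr]

theorem pvRunsPairwise : ∀ (l : List String), l.Pairwise (· ≤ ·) →
    ((pvRunLengths l).map Prod.fst).Pairwise (· < ·) := by
  intro l
  induction l using pvRunLengths.induct with
  | case1 => intro _; simp [pvRunLengths]
  | case2 x rest ih =>
    intro hp
    have hd : (rest.dropWhile (fun z => z == x)).Pairwise (· ≤ ·) :=
      hp.sublist ((List.dropWhile_sublist _).trans (List.sublist_cons_self x rest))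
    have hxd : ∀ y ∈ rest.dropWhile (fun z => z == x), x < y := pvLtOfMemDropWhile x rest hp
    rw [pvRunLengths]
    simp only [List.map_cons]
    apply List.pairwise_cons.mpr
    refine ⟨?_, ih hd⟩
    intro k hk
    exact hxd k ((pvMemFstRuns _ k).mp hk)

theorem pvMapSelf {α β : Type} (g : α → β) :
    ∀ (l : List (α × β)), (∀ p ∈ l, p.2 = g p.1) → l = (l.map Prod.fst).map (fun k => (k, g k)) := by
  intro l
  induction l with
  | nil => intro _; rfl
  | cons p ps ih =>
    intro h
    simp only [List.map_cons]
    rw [← h p (by simp), ← ih (fun q hq => h q (List.mem_cons_of_mem _ hq))]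

-- main proof
theorem pvMain (build_order : List (String × String × String)) (buildstep : Int)
    (hpre : buildstep ≤ (build_order.length : Int)) :
    get_build_order_progress build_order buildstep = get_build_order_progress_alt build_order buildstep := by
  unfold get_build_order_progress get_build_order_progress_alt
  rw [pvFoldPrefix build_order _ buildstep hpre, pvFoldPrefix build_order _ buildstep hpre]
  set prefixL := build_order.take buildstep.toNat with hprefix
  rw [pvDictLoopEqCounter, PySem.List.foldl_append_if (fun t => t.2.2 == "structure") (fun t => t.1) prefixL []]
  set names := (prefixL.filter (fun t => t.2.2 == "structure")).map (fun t => t.1) with hnames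
  simp only [List.nil_append]
  -- B side
  set S := PySem.List.sorted names (fun x => x) false with hS
  have hSp : S.Pairwise (· ≤ ·) := by
    have := PySem.List.sorted_pairwise names (fun x => x)
    simpa using this
  have hScount : ∀ k, S.count k = names.count k := fun k =>
    (PySem.List.sorted_perm names (fun x => x) false).count_eq k
  -- runs characterised
  have hruns : pvRunLengths S = ((pvRunLengths S).map Prod.fst).map (fun k => (k, (names.count k : Int))) := by
    have h1 := pvMapSelf (fun k => (S.count k : Int)) (pvRunLengths S) (pvRunsSnd S hSp)
    conv_lhs => rw [h1]
    simp only [hScount]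
  -- A side items
  have hitems : (PySem.Dict.counter names).items = (PySem.Set.ofList names).map (fun k => (k, (names.count k : Int))) :=
    PySem.Dict.items_counter names
  -- key lists are permutations
  have hnodup1 : ((pvRunLengths S).map Prod.fst).Nodup :=
    (pvRunsPairwise S hSp).imp (fun h => ne_of_lt h)
  have hnodup2 : (PySem.Set.ofList names).Nodup := PySem.Set.nodup_ofList names
  have hkeysperm : ((pvRunLengths S).map Prod.fst).Perm (PySem.Set.ofList names) := by
    rw [List.perm_ext_iff_of_nodup hnodup1 hnodup2]
    intro k
    rw [pvMemFstRuns S k, PySem.Set.mem_ofList]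
    exact (PySem.List.mem_sorted names (fun x => x) false (x := k))
  have hperm : (pvRunLengths S).Perm ((PySem.Dict.counter names).items) := by
    rw [hitems, hruns]
    exact hkeysperm.map _
  have hpw : (pvRunLengths S).Pairwise (fun a b => a.1 < b.1) := by
    have := pvRunsPairwise S hSp
    rwa [List.pairwise_map] at this
  have hsorted : PySem.List.sorted ((PySem.Dict.counter names).items) Prod.fst false = pvRunLengths S :=
    PySem.List.sorted_eq_of_perm_of_pairwise_lt _ _ Prod.fst hperm hpw
  have hinj : ∀ a ∈ (PySem.Dict.counter names).items, ∀ b ∈ (PySem.Dict.counter names).items, a.1 = b.1 → a = b := by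
    rw [hitems]
    intro a ha b hb hab
    rcases List.mem_map.mp ha with ⟨k1, _, rfl⟩
    rcases List.mem_map.mp hb with ⟨k2, _, rfl⟩
    simp only at hab
    rw [hab]
  rw [pvSorted2EqSortedFst _ hinj, hsorted]

-- ===== VERDICT (by name: the statement is the Claim_ definition above) =====
theorem get_build_order_progress_spec : Claim_equal_get_build_order_progress := by
  intro build_order buildstep _ hpre
  unfold Spec_get_build_order_progress
  exact pvMain build_order buildstep hpre
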